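-- pv_equiv track=rewrite | github.com/DaHuO/Supergraph_exp | test_input/CJ_0/16_1_1_AravSinghal_last_word.py | get_highest
-- ===== SOURCE A (Python) =====
-- def get_highest(s=''):
--     new_s = s[0]
--
--     for i in range(1, len(s)):
--         c = s[i]
--         if ord(c) < ord(new_s[0]):
--             new_s = new_s + c
--         else:
--             new_s = c + new_s
--
--     return new_s
-- ===== SOURCE B (Python) =====
-- def get_highest(s=''):
--     first = s[0]
--     # pass 1: prefix maxima of s
--     maxes = []
--     m = first
--     for c in s:
--         if c > m:
--             m = c
--         maxes.append(m)
--     # pass 2: a character belongs in front exactly when it is a prefix maximum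
--     records = [c for c, mm in zip(s[1:], maxes[1:]) if c == mm]
--     others = [c for c, mm in zip(s[1:], maxes[1:]) if c != mm]
--     return ''.join(records[::-1]) + first + ''.join(others)
-- ===== Notes on version B (the rewrite author's own statement) =====
-- stated objective: faster
-- what changed: B computes the prefix-maxima array of s in a separate first pass, then classifies each later character purely by equality with its prefix maximum (a char goes in front iff it is a prefix maximum, i.e. >= everything before it) via two comprehensions over zip(s[1:], maxes[1:]), and joins once; A instead keeps one growing string and prepends/appends to it per step.
import Mathlib
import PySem

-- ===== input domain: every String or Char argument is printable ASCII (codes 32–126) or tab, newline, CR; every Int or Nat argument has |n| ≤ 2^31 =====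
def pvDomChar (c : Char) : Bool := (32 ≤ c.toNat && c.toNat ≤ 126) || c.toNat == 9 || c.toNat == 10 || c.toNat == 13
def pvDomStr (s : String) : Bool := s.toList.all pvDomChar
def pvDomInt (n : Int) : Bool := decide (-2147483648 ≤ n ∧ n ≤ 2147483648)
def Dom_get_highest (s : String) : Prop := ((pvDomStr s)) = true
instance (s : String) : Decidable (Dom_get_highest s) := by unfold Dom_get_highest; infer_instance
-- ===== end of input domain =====

-- B computes the prefix-maxima array in a first pass, then classifies each later character by
-- equality with its prefix maximum and joins once, replacing A's quadratic string prepend/append loop.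

-- ===== PORT A =====
-- new_s = s[0]; for i in range(1, len(s)): c = s[i]; if ord(c) < ord(new_s[0]): new_s += c else: new_s = c + new_s
def get_highest (s : String) : String :=
  let cs := s.toList
  let new_s :=
    (List.range' 1 (cs.length - 1)).foldl
      (fun ns i =>
        let c := cs.getD i ' '
        if c.toNat < (ns.headD ' ').toNat then ns ++ [c] else c :: ns)
      [cs.headD ' ']
  String.ofList new_s

-- ===== PORT B =====
def get_highest_alt (s : String) : String :=
  match s.toList with
  | [] => ""   -- unreachable under Pre_ (Python B raises IndexError on '': first = s[0])
  | first :: rest =>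
    -- pass 1: prefix maxima of s
    let maxes :=
      ((first :: rest).foldl
        (fun (st : Char × List Char) c =>
          let m := if st.1.toNat < c.toNat then c else st.1
          (m, st.2 ++ [m]))
        (first, [])).2
    -- pass 2: a character belongs in front exactly when it is a prefix maximum
    let ps := rest.zip maxes.tail
    let records := (ps.filter (fun p => p.1 == p.2)).map Prod.fst
    let others := (ps.filter (fun p => !(p.1 == p.2))).map Prod.fst
    String.ofList (records.reverse ++ first :: others)

-- ===== PRECONDITION & SPEC =====
-- A evaluates s[0] and raises IndexError on the empty string; Pre_ excludes exactly that.
def Pre_get_highest (s : String) : Prop := s ≠ ""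
instance (s : String) : Decidable (Pre_get_highest s) := by unfold Pre_get_highest; infer_instance
def pvWitness_get_highest : String := "banana"

def Spec_get_highest (s : String) (out : String) : Prop := out = get_highest_alt s
instance (s : String) (out : String) : Decidable (Spec_get_highest s out) := by unfold Spec_get_highest; infer_instance

-- ===== CLAIM (what is proved, stated in full; the proofs are below) =====
def Claim_equal_get_highest : Prop := ∀ (s : String), Dom_get_highest s → Pre_get_highest s → Spec_get_highest s (get_highest s)

-- ===== LEMMAS AND PROOFS =====

-- Common recursive specification: (chars that go in front, chars that go in back),
-- given the current maximum m.
def specP (m : Char) : List Char → List Char × List Char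
  | [] => ([], [])
  | c :: t =>
    if m.toNat ≤ c.toNat then
      let p := specP c t; (c :: p.1, p.2)
    else
      let p := specP m t; (p.1, c :: p.2)

-- Prefix-maxima scan starting from current maximum m.
def scanMax (m : Char) : List Char → List Char
  | [] => []
  | c :: t =>
    let m' := if m.toNat < c.toNat then c else m
    m' :: scanMax m' t

-- A's index loop over range(1, len) is a fold over the tail of the list.
theorem fold_idx (g : List Char → Char → List Char) :
    ∀ (t : List Char) (pre : List Char) (init : List Char),
      (List.range' pre.length t.length).foldl (fun ns i => g ns ((pre ++ t).getD i ' ')) init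
        = t.foldl g init := by
  intro t
  induction t with
  | nil => intro pre init; simp
  | cons c t ih =>
    intro pre init
    have hget : (pre ++ c :: t).getD pre.length ' ' = c := by
      simp [List.getD]
    rw [List.length_cons, List.range'_succ, List.foldl_cons, hget]
    have := ih (pre ++ [c]) (g init c)
    simpa [List.length_append] using this

theorem headD_rev (h : Char) : ∀ (pre app : List Char),
    (pre.reverse ++ h :: app).headD ' ' = pre.getLastD h := by
  intro pre app
  induction pre using List.reverseRecOn with
  | nil => rfl
  | append_singleton xs x ih => simp

-- A's loop state is (records so far).reverse ++ h :: (others so far), whose head is the running max.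
theorem a_inv (h : Char) :
    ∀ (t : List Char) (pre app : List Char),
      t.foldl
        (fun ns c => if c.toNat < (ns.headD ' ').toNat then ns ++ [c] else c :: ns)
        (pre.reverse ++ h :: app)
      = (specP (pre.getLastD h) t).1.reverse ++ pre.reverse
          ++ h :: (app ++ (specP (pre.getLastD h) t).2) := by
  intro t
  induction t with
  | nil => intro pre app; simp [specP]
  | cons c t ih =>
    intro pre app
    simp only [List.foldl_cons, headD_rev]
    by_cases hc : c.toNat < (pre.getLastD h).toNat
    · have hnot : ¬ (pre.getLastD h).toNat ≤ c.toNat := by omega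
      rw [if_pos hc]
      have hst : (pre.reverse ++ h :: app) ++ [c] = pre.reverse ++ h :: (app ++ [c]) := by simp
      rw [hst, ih pre (app ++ [c]),
        show specP (pre.getLastD h) (c :: t)
            = ((specP (pre.getLastD h) t).1, c :: (specP (pre.getLastD h) t).2) from by
          generalize pre.getLastD h = m at hnot ⊢
          simp [specP, hnot]]
      simp
    · have hle : (pre.getLastD h).toNat ≤ c.toNat := by omega
      rw [if_neg hc]
      have h1 : c :: (pre.reverse ++ h :: app) = (pre ++ [c]).reverse ++ h :: app := by simp
      rw [h1, ih (pre ++ [c]) app,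
        show (pre ++ [c]).getLastD h = c from by simp,
        show specP (pre.getLastD h) (c :: t) = (c :: (specP c t).1, (specP c t).2) from by
          generalize pre.getLastD h = m at hle ⊢
          simp [specP, hle]]
      simp

-- B's scanning fold returns acc ++ scanMax m t in its second component.
theorem scan_fold :
    ∀ (t : List Char) (m : Char) (acc : List Char),
      (t.foldl
        (fun (st : Char × List Char) c =>
          let m := if st.1.toNat < c.toNat then c else st.1
          (m, st.2 ++ [m]))
        (m, acc)).2 = acc ++ scanMax m t := by
  intro t
  induction t with
  | nil => intro m acc; simp [scanMax]
  | cons c t ih =>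
    intro m acc
    simp only [List.foldl_cons, scanMax]
    rw [ih]
    simp

-- Classifying by equality with the prefix maximum yields specP's components.
theorem zip_scan_records :
    ∀ (t : List Char) (m : Char),
      (((t.zip (scanMax m t)).filter (fun p => p.1 == p.2)).map Prod.fst = (specP m t).1)
      ∧ (((t.zip (scanMax m t)).filter (fun p => !(p.1 == p.2))).map Prod.fst = (specP m t).2) := by
  intro t
  induction t with
  | nil => intro m; simp [scanMax, specP]
  | cons c t ih =>
    intro m
    by_cases hle : m.toNat ≤ c.toNat
    · have hm' : (if m.toNat < c.toNat then c else m) = c := by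
        by_cases hlt : m.toNat < c.toNat
        · simp [hlt]
        · have : m.toNat = c.toNat := by omega
          have : m = c := Char.ext (by
            have := congrArg id this
            exact UInt32.toNat_inj.mp ‹m.toNat = c.toNat›)
          simp [hlt, this]
      constructor <;>
        simp [scanMax, specP, hm', hle, (ih c).1, (ih c).2]
    · have hm' : (if m.toNat < c.toNat then c else m) = m := by
        have : ¬ m.toNat < c.toNat := by omega
        simp [this]
      have hne : ¬ (c == m) := by
        intro hb
        have : c = m := by exact beq_iff_eq.mp hb
        subst this; omega
      constructor <;>
        simp [scanMax, specP, hm', hle, hne, (ih m).1, (ih m).2]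

-- ===== VERDICT (by name: the statement is the Claim_ definition above) =====
theorem get_highest_spec : Claim_equal_get_highest := by
  intro s _ hpre
  unfold Spec_get_highest get_highest get_highest_alt
  have hne : s.toList ≠ [] := by
    intro h0
    exact hpre (by simpa using congrArg String.ofList h0)
  cases hcs : s.toList with
  | nil => exact absurd hcs hne
  | cons h t =>
    simp only [List.length_cons, Nat.add_sub_cancel, List.headD_cons]
    have hfi := fold_idx
      (fun ns c => if c.toNat < (ns.headD ' ').toNat then ns ++ [c] else c :: ns)
      t [h] [h]
    simp only [List.length_singleton, List.singleton_append] at hfi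
    rw [hfi]
    have hA := a_inv h t [] []
    simp only [List.reverse_nil, List.nil_append, List.getLastD_nil] at hA
    rw [hA]
    -- B side
    have hscan : ((h :: t).foldl
        (fun (st : Char × List Char) c =>
          let m := if st.1.toNat < c.toNat then c else st.1
          (m, st.2 ++ [m]))
        (h, [])).2 = h :: scanMax h t := by
      have := scan_fold (h :: t) h []
      simpa [scanMax] using this
    rw [hscan]
    simp only [List.tail_cons]
    rw [(zip_scan_records t h).1, (zip_scan_records t h).2]
    simp
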